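-- pv_equiv track=rewrite | github.com/Wellan76/code-de-vigen-re | Projet_info_n1.py | IC2
-- ===== SOURCE A (Python) =====
-- def IC2(a:int):
--     str = ""
--     sous_chaine = []
--     for j in range(0,2):
--         for i in range(j,len(a),2):
--             str = str + a[i]
--         sous_chaine.append(str)
--         str = ""
--     return sous_chaine
-- ===== SOURCE B (Python) =====
-- def IC2(a):
--     res = [[], []]
--     for i, c in enumerate(a):
--         res[i % 2].append(c)
--     return ["".join(res[0]), "".join(res[1])]
-- ===== Notes on version B (the rewrite author's own statement) =====
-- stated objective: simpler
-- what changed: Replaces the nested two-pass loop (outer parity loop, inner step-2 index loop) with a single enumerate pass that buckets each character by index parity into two lists joined at the end.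
import Mathlib
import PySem

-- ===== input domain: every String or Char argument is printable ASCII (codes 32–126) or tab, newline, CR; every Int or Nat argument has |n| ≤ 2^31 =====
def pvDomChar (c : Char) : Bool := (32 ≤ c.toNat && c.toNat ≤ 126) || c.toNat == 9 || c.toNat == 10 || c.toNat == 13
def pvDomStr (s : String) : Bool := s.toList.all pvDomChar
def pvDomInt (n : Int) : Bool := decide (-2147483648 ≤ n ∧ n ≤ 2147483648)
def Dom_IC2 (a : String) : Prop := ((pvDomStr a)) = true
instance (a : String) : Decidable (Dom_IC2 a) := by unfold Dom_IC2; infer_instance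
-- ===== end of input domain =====

-- B replaces A's nested two-pass parity loops with one enumerate pass into two accumulators (simpler).


-- ===== PORT A =====
-- a[i] is always in range here, so pyGet?.getD ' ' is exact (the default is never used)
def IC2 (a : String) : List String :=
  let st := (PySem.List.pyRange 0 2 1).foldl
    (fun (st : String × List String) j =>
      let s := (PySem.List.pyRange j ((a.toList.length : Int)) 2).foldl
        (fun s i => s.push ((PySem.Str.pyGet? a i).getD ' ')) st.1
      ("", st.2 ++ [s]))
    ("", [])
  st.2

-- ===== PORT B =====
def IC2_alt (a : String) : List String :=
  let r := (PySem.List.enumerate a.toList).foldl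
    (fun (r : List Char × List Char) (p : Int × Char) =>
      if p.1 % 2 = 0 then (r.1 ++ [p.2], r.2) else (r.1, r.2 ++ [p.2]))
    ([], [])
  [String.ofList r.1, String.ofList r.2]

-- ===== PRECONDITION & SPEC =====
def Spec_IC2 (a : String) (out : List String) : Prop := out = IC2_alt a
instance (a : String) (out : List String) : Decidable (Spec_IC2 a out) := by unfold Spec_IC2; infer_instance

-- ===== CLAIM (what is proved, stated in full; the proofs are below) =====
def Claim_equal_IC2 : Prop := ∀ (a : String), Dom_IC2 a → Spec_IC2 a (IC2 a)

-- ===== LEMMAS AND PROOFS =====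

mutual
def pvEvens : List Char → List Char
  | [] => []
  | c :: t => c :: pvOdds t
def pvOdds : List Char → List Char
  | [] => []
  | _ :: t => pvEvens t
end

theorem pvOdds_eq_evens_tail (l : List Char) : pvOdds l = pvEvens l.tail := by
  cases l <;> simp [pvOdds, pvEvens]

theorem pvRange_two_cons (j n : Int) (h : j < n) :
    PySem.List.pyRange j n 2 = j :: PySem.List.pyRange (j + 2) n 2 := by
  rw [PySem.List.pyRange_of_pos _ _ (by norm_num), PySem.List.pyRange_of_pos _ _ (by norm_num)]
  simp only [if_pos h]
  have hc : (n - j + 2 - 1) / 2 = ((n - j + 1) / 2 : Int) := by ring_nf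
  by_cases h2 : j + 2 < n
  · rw [if_pos h2]
    have h1 : ((n - j + 1) / 2).toNat = ((n - (j + 2) + 2 - 1) / 2).toNat + 1 := by omega
    rw [hc, h1, List.range_succ_eq_map]
    simp [List.map_map, Function.comp]
    intro k _; ring
  · rw [if_neg h2]
    have h1 : ((n - j + 1) / 2).toNat = 1 := by omega
    rw [hc, h1]
    simp

theorem pvRange_two_nil (j n : Int) (h : n ≤ j) : PySem.List.pyRange j n 2 = [] := by
  rw [PySem.List.pyRange_of_pos _ _ (by norm_num)]
  simp [show ¬ j < n by omega]

theorem pvInner (l : List Char) (k : Nat) (p : String) :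
    (PySem.List.pyRange (k : Int) (l.length : Int) 2).foldl
      (fun s i => s.push ((PySem.List.pyGet? l i).getD ' ')) p
    = String.ofList (p.toList ++ pvEvens (l.drop k)) := by
  by_cases h : k < l.length
  · rw [pvRange_two_cons _ _ (by exact_mod_cast h)]
    simp only [List.foldl_cons]
    have hget : PySem.List.pyGet? l (k : Int) = some l[k] := by
      simp [PySem.List.pyGet?, PySem.List.pyIdx?, h]
    have : ((k : Int) + 2) = ((k + 2 : Nat) : Int) := by push_cast; ring
    rw [hget]; simp only [Option.getD_some]
    rw [this, pvInner l (k + 2) (p.push l[k])]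
    have hdrop : l.drop k = l[k] :: l.drop (k + 1) := List.drop_eq_getElem_cons h
    have : pvEvens (l.drop k) = l[k] :: pvEvens (l.drop (k + 2)) := by
      rw [hdrop, pvEvens, pvOdds_eq_evens_tail, List.tail_drop]
    rw [this]
    simp [String.toList_push]
  · rw [pvRange_two_nil _ _ (by exact_mod_cast Nat.le_of_not_lt h)]
    simp [List.drop_eq_nil_of_le (Nat.le_of_not_lt h), pvEvens]
termination_by l.length - k

theorem pvBFold (l : List Char) : ∀ (s : Int) (p q : List Char),
    (PySem.List.enumerate l s).foldl
      (fun (r : List Char × List Char) (x : Int × Char) =>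
        if x.1 % 2 = 0 then (r.1 ++ [x.2], r.2) else (r.1, r.2 ++ [x.2]))
      (p, q)
    = if s % 2 = 0 then (p ++ pvEvens l, q ++ pvOdds l)
      else (p ++ pvOdds l, q ++ pvEvens l) := by
  induction l with
  | nil => intro s p q; simp [PySem.List.enumerate, pvEvens, pvOdds]
  | cons c t ih =>
    intro s p q
    rw [PySem.List.enumerate_cons]
    simp only [List.foldl_cons]
    by_cases hs : s % 2 = 0
    · have hs1 : ¬ (s + 1) % 2 = 0 := by omega
      simp only [hs, if_pos rfl, if_true]
      rw [ih (s + 1) (p ++ [c]) q]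
      simp [hs1, pvEvens, pvOdds]
    · have hs1 : (s + 1) % 2 = 0 := by omega
      simp only [if_neg hs]
      rw [ih (s + 1) p (q ++ [c])]
      simp [hs1, pvEvens, pvOdds]

-- ===== VERDICT (by name: the statement is the Claim_ definition above) =====
theorem IC2_spec : Claim_equal_IC2 := by
  intro a _
  unfold Spec_IC2 IC2 IC2_alt
  have hr : PySem.List.pyRange 0 2 1 = [0, 1] := by decide
  rw [hr]
  simp only [List.foldl_cons, List.foldl_nil]
  have hget : ∀ i, (PySem.Str.pyGet? a i).getD ' ' = (PySem.List.pyGet? a.toList i).getD ' ' := by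
    intro i; simp
  simp only [hget]
  have h0 := pvInner a.toList 0 ""
  have h1 := pvInner a.toList 1 ""
  simp only [Nat.cast_zero, Nat.cast_one, String.length_toList] at h0 h1
  rw [pvBFold a.toList 0 [] []]
  simp only [show (0 : Int) % 2 = 0 from rfl]
  simp [h0, h1, pvOdds_eq_evens_tail]
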